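-- pv_equiv track=rewrite | github.com/SirSanewa/rekrutacja | populate_db.py | password_safety
-- ===== SOURCE A (Python) =====
-- def password_safety(password):
--     """
--     Calculates password's safety and returns score as an int.
--     :param password: str
--     :return: score int
--     """
--     pts = 0
--     str_func_list = [
--         {"function": str.islower, "points": 1},
--         {"function": str.isupper, "points": 2},
--         {"function": str.isdigit, "points": 1},
--     ]
--     for element in str_func_list:
--         if sum(map(element["function"], password)) >= 1:
--             pts += element["points"]
--     if len(password) >= 8:
--         pts += 5
--     if not str.isalnum(password):
--         pts += 3
--     return pts
-- ===== SOURCE B (Python) =====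
-- def password_safety(password):
--     has_lower = has_upper = has_digit = False
--     for c in password:
--         if c.islower():
--             has_lower = True
--         if c.isupper():
--             has_upper = True
--         if c.isdigit():
--             has_digit = True
--     pts = (1 if has_lower else 0) + (2 if has_upper else 0) + (1 if has_digit else 0)
--     if len(password) >= 8:
--         pts += 5
--     if not password.isalnum():
--         pts += 3
--     return pts
-- ===== Notes on version B (the rewrite author's own statement) =====
-- stated objective: simpler
-- what changed: Replaced the list-of-dicts table with its per-category sum(map(...)) full scans by a single pass over the characters maintaining three booleans, then adding the fixed points for each flag.
import Mathlib
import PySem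

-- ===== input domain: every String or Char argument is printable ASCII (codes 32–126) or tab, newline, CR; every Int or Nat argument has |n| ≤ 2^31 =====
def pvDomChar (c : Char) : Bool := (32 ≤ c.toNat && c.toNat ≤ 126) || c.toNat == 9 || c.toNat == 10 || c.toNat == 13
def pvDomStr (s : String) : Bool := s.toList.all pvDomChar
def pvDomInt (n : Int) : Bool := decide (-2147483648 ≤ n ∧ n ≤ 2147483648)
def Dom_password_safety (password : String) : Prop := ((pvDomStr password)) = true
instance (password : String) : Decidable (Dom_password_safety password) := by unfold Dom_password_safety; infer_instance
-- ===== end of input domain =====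

-- B replaces A's table of (predicate, points) with its per-category sum(map(...)) scans by one
-- pass maintaining three booleans; objective: simpler.

-- ===== PORT A =====
def password_safety (password : String) : Int :=
  let pts : Int := 0
  let strFuncList : List ((Char → Bool) × Int) :=
    [(PySem.Chars.islower, 1), (PySem.Chars.isupper, 2), (PySem.Chars.isdigit, 1)]
  let pts := strFuncList.foldl
    (fun pts e =>
      if ((password.toList.map (fun c => if e.1 c then (1 : Int) else 0)).sum ≥ 1) then
        pts + e.2
      else pts) pts
  let pts := if PySem.Str.len password ≥ 8 then pts + 5 else pts
  let pts := if ¬ (PySem.Str.strIsalnum password = true) then pts + 3 else pts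
  pts

-- ===== PORT B =====
def password_safety_alt (password : String) : Int :=
  let flags := password.toList.foldl
    (fun (f : Bool × Bool × Bool) c =>
      let f := if PySem.Chars.islower c then (true, f.2.1, f.2.2) else f
      let f := if PySem.Chars.isupper c then (f.1, true, f.2.2) else f
      if PySem.Chars.isdigit c then (f.1, f.2.1, true) else f)
    (false, false, false)
  let pts : Int := (if flags.1 then 1 else 0) + (if flags.2.1 then 2 else 0) +
    (if flags.2.2 then 1 else 0)
  let pts := if PySem.Str.len password ≥ 8 then pts + 5 else pts
  if ¬ (PySem.Str.strIsalnum password = true) then pts + 3 else pts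

-- ===== PRECONDITION & SPEC =====
def Spec_password_safety (password : String) (out : Int) : Prop := out = password_safety_alt password
instance (password : String) (out : Int) : Decidable (Spec_password_safety password out) := by unfold Spec_password_safety; infer_instance

-- ===== CLAIM (what is proved, stated in full; the proofs are below) =====
def Claim_equal_password_safety : Prop := ∀ (password : String), Dom_password_safety password → Spec_password_safety password (password_safety password)

-- ===== LEMMAS AND PROOFS =====

-- A's 0/1 sum over a predicate is ≥ 1 exactly when some character satisfies the predicate.
theorem pv_sum_nonneg (cs : List Char) (p : Char → Bool) :
    (0 : Int) ≤ (cs.map (fun c => if p c then (1 : Int) else 0)).sum := by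
  apply List.sum_nonneg; intro x hx
  simp only [List.mem_map] at hx
  obtain ⟨c', _, rfl⟩ := hx
  split <;> omega

theorem pv_sum_ge_one_iff_any (cs : List Char) (p : Char → Bool) :
    ((cs.map (fun c => if p c then (1 : Int) else 0)).sum ≥ 1) ↔ cs.any p = true := by
  induction cs with
  | nil => simp
  | cons c cs ih =>
    have h0 := pv_sum_nonneg cs p
    by_cases h : p c = true <;> simp [h, ← ih] <;> omega

-- B's one-pass fold computes the three List.any flags.
theorem pv_fold_flags (cs : List Char) (f : Bool × Bool × Bool) :
    cs.foldl
      (fun (f : Bool × Bool × Bool) c =>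
        let f := if PySem.Chars.islower c then (true, f.2.1, f.2.2) else f
        let f := if PySem.Chars.isupper c then (f.1, true, f.2.2) else f
        if PySem.Chars.isdigit c then (f.1, f.2.1, true) else f) f
      = (f.1 || cs.any PySem.Chars.islower,
         f.2.1 || cs.any PySem.Chars.isupper,
         f.2.2 || cs.any PySem.Chars.isdigit) := by
  induction cs generalizing f with
  | nil => simp
  | cons c cs ih =>
    simp only [List.foldl_cons, List.any_cons, ih]
    obtain ⟨a, b, d⟩ := f
    by_cases h1 : PySem.Chars.islower c <;>
      by_cases h2 : PySem.Chars.isupper c <;>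
        by_cases h3 : PySem.Chars.isdigit c <;>
          simp [h1, h2, h3]

-- ===== VERDICT (by name: the statement is the Claim_ definition above) =====
theorem password_safety_spec : Claim_equal_password_safety := by
  intro password _
  unfold Spec_password_safety password_safety password_safety_alt
  simp only [List.foldl_cons, List.foldl_nil, pv_fold_flags, Bool.false_or]
  by_cases h1 : password.toList.any PySem.Chars.islower <;>
    by_cases h2 : password.toList.any PySem.Chars.isupper <;>
      by_cases h3 : password.toList.any PySem.Chars.isdigit <;>
        simp [pv_sum_ge_one_iff_any, h1, h2, h3]
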